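-- pv_equiv track=rewrite | github.com/ShivamSharma98769876/S002 | backfill_option_premiums.py | decode_strike_from_symbol
-- ===== SOURCE A (Python) =====
-- from typing import Optional, Tuple
--
-- def decode_strike_from_symbol(symbol: str) -> Optional[int]:
--     """
--     Best-effort extraction of strike price from option symbol.
--
--     Examples:
--       - BANKNIFTY25DEC59200PE -> 59200
--       - NIFTY25D0926050PE     -> 26050
--       - SENSEX25D0485000CE    -> 85000
--     """
--     if not symbol or not isinstance(symbol, str):
--         return None
--
--     # Strip final two letters (CE/PE)
--     core = symbol[:-2]
--
--     # Walk backwards to find where digits (strike) start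
--     i = len(core) - 1
--     while i >= 0 and core[i].isdigit():
--         i -= 1
--     digits = core[i + 1 :]
--     if not digits:
--         return None
--     try:
--         return int(digits)
--     except ValueError:
--         return None
-- ===== SOURCE B (Python) =====
-- from typing import Optional
--
-- def decode_strike_from_symbol(symbol: str) -> Optional[int]:
--     if not symbol or not isinstance(symbol, str):
--         return None
--     run = ''
--     for c in symbol[:-2]:
--         run = run + c if c.isdigit() else ''
--     return int(run) if run else None
-- ===== Notes on version B (the rewrite author's own statement) =====
-- stated objective: alternative
-- what changed: The backward index walk with slice bookkeeping and try/except is replaced by a single forward pass that accumulates the current digit run into a string, resetting it on every non-digit, so the trailing run is simply what remains at the end.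
import Mathlib
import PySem

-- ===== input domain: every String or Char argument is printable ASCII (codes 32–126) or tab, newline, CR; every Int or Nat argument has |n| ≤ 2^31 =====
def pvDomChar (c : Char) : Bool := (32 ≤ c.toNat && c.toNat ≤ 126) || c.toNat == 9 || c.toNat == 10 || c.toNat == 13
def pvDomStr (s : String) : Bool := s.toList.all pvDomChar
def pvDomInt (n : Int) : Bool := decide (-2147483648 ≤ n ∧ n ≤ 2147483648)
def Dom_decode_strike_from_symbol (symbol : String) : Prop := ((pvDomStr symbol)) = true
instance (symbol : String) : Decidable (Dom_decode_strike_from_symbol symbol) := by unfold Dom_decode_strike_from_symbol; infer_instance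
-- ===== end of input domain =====

-- B replaces A's backward index walk + slice + try/except by ONE forward pass that accumulates the
-- current digit run, resetting on every non-digit (objective: alternative decomposition).

-- ===== PORT A =====
-- while i >= 0 and core[i].isdigit(): i -= 1   (i starts at len(core)-1; the Nat argument is i+1,
-- so 0 encodes i = -1; core.getD n ' ' is core[i], always in range here)
def pvWalkA (core : List Char) : Nat → Int
  | 0 => -1
  | n+1 => if PySem.Chars.isdigit (core.getD n ' ') then pvWalkA core n else (n : Int)

def decode_strike_from_symbol (symbol : String) : Option Int :=
  if symbol = "" then none
  else
    let core := PySem.List.slice symbol.toList none (some (-2))   -- symbol[:-2]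
    let i := pvWalkA core core.length
    let digits := core.drop (i + 1).toNat                          -- core[i+1:] (0 ≤ i+1)
    if digits = [] then none
    else PySem.Int.ofStr? (String.ofList digits)                       -- try int(digits) / except ValueError: None

-- ===== PORT B =====
def decode_strike_from_symbol_alt (symbol : String) : Option Int :=
  if symbol = "" then none
  else
    -- run = ''; for c in symbol[:-2]: run = run + c if c.isdigit() else ''
    let run := (PySem.List.slice symbol.toList none (some (-2))).foldl
        (fun acc c => if PySem.Chars.isdigit c then acc ++ [c] else []) []
    if run ≠ [] then PySem.Int.ofStr? (String.ofList run) else none     -- int(run) if run else None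

-- ===== PRECONDITION & SPEC =====
def Spec_decode_strike_from_symbol (symbol : String) (out : Option Int) : Prop := out = decode_strike_from_symbol_alt symbol
instance (symbol : String) (out : Option Int) : Decidable (Spec_decode_strike_from_symbol symbol out) := by unfold Spec_decode_strike_from_symbol; infer_instance

-- ===== CLAIM (what is proved, stated in full; the proofs are below) =====
def Claim_equal_decode_strike_from_symbol : Prop := ∀ (symbol : String), Dom_decode_strike_from_symbol symbol → Spec_decode_strike_from_symbol symbol (decode_strike_from_symbol symbol)

-- ===== LEMMAS AND PROOFS =====

-- A's backward walk, characterised: the final i is len − 1 − (length of the trailing digit run).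
lemma pvWalkA_eq (core : List Char) (n : Nat) (hn : n ≤ core.length) :
    pvWalkA core n =
      (n : Int) - 1 - ((core.take n).reverse.takeWhile PySem.Chars.isdigit).length := by
  induction n with
  | zero => simp [pvWalkA]
  | succ n ih =>
    have hn' : n < core.length := hn
    have htake : core.take (n+1) = core.take n ++ [core[n]] := by
      rw [List.take_add_one]
      simp [List.getElem?_eq_getElem hn']
    have hgetD : core.getD n ' ' = core[n] := by
      simp [List.getD_eq_getElem?_getD, List.getElem?_eq_getElem hn']
    rw [pvWalkA, hgetD, htake]
    by_cases hd : PySem.Chars.isdigit core[n] = true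
    · rw [if_pos hd, ih (Nat.le_of_lt hn')]
      simp only [List.reverse_append, List.reverse_cons, List.reverse_nil, List.nil_append,
        List.cons_append, List.takeWhile_cons, hd, if_pos, List.length_cons]
      push_cast
      ring
    · rw [if_neg hd]
      simp only [List.reverse_append, List.reverse_cons, List.reverse_nil, List.nil_append,
        List.cons_append, List.takeWhile_cons, hd]
      simp

-- B's forward reset-accumulator, characterised: it ends holding exactly the trailing digit run.
lemma pvRun_eq (cs : List Char) :
    cs.foldl (fun acc c => if PySem.Chars.isdigit c then acc ++ [c] else []) [] =
      (cs.reverse.takeWhile PySem.Chars.isdigit).reverse := by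
  induction cs using List.reverseRecOn with
  | nil => simp
  | append_singleton cs c ih =>
    rw [List.foldl_append, List.foldl_cons, List.foldl_nil]
    by_cases hd : PySem.Chars.isdigit c = true
    · simp [hd, ih, List.takeWhile_cons]
    · simp [hd, List.takeWhile_cons]

theorem decode_strike_from_symbol_spec : Claim_equal_decode_strike_from_symbol := by
  intro symbol _
  unfold Spec_decode_strike_from_symbol
  by_cases hs : symbol = ""
  · simp [decode_strike_from_symbol, decode_strike_from_symbol_alt, hs]
  · simp only [decode_strike_from_symbol, decode_strike_from_symbol_alt, if_neg hs]
    set core := PySem.List.slice symbol.toList none (some (-2)) with hcore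
    rw [pvRun_eq]
    set L := (core.reverse.takeWhile PySem.Chars.isdigit).length with hLdef
    have hLD : L + (core.reverse.dropWhile PySem.Chars.isdigit).length = core.length := by
      have h := congrArg List.length
        (List.takeWhile_append_dropWhile (p := PySem.Chars.isdigit) (l := core.reverse))
      rw [List.length_append, List.length_reverse] at h
      omega
    have hwalk := pvWalkA_eq core core.length le_rfl
    rw [List.take_length] at hwalk
    rw [hwalk]
    have htn : (((core.length : Int)) - 1 - L + 1).toNat = core.length - L := by omega
    rw [htn]
    -- core.drop (len − L) is exactly the trailing digit run
    set pre := (core.reverse.dropWhile PySem.Chars.isdigit).reverse with hpre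
    set suf := (core.reverse.takeWhile PySem.Chars.isdigit).reverse with hsuf
    have hsplit : core = pre ++ suf := by
      rw [hpre, hsuf, ← List.reverse_append,
        List.takeWhile_append_dropWhile (p := PySem.Chars.isdigit) (l := core.reverse),
        List.reverse_reverse]
    have hpre_len : pre.length = core.length - L := by
      rw [hpre, List.length_reverse]; omega
    have hdrop : core.drop (core.length - L) = suf := by
      rw [← hpre_len]
      conv_lhs => rw [hsplit]
      simp
    rw [hdrop]
    by_cases hL0 : suf = []
    · simp [hL0]
    · simp [hL0]
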